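-- pv_equiv track=rewrite | github.com/rbauwens/AdventOfCode | days/day_four.py | meets_criteria_one
-- ===== SOURCE A (Python) =====
-- def meets_criteria_one(num):
--     string_num = str(num)
--     len_num = len(string_num)
--     double = False
--     ascending = True
--     for i in range(0, len_num - 1):
--         if string_num[i] == string_num[i+1]:
--             double = True
--         if string_num[i] > string_num[i + 1]:
--             ascending = False
--
--     if double and ascending:
--         return True
--     else:
--         return False
-- ===== SOURCE B (Python) =====
-- def meets_criteria_one(num):
--     s = str(num)
--     ascending = list(s) == sorted(s)
--     double = any(a == b for a, b in zip(s, s[1:]))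
--     return ascending and double
-- ===== Notes on version B (the rewrite author's own statement) =====
-- stated objective: simpler
-- what changed: Replaces the single index-driven flag loop by two independent passes: ascending is decided by comparing the digit string with its sorted copy, and the adjacent double by an any() over zip(s, s[1:]).
import Mathlib
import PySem

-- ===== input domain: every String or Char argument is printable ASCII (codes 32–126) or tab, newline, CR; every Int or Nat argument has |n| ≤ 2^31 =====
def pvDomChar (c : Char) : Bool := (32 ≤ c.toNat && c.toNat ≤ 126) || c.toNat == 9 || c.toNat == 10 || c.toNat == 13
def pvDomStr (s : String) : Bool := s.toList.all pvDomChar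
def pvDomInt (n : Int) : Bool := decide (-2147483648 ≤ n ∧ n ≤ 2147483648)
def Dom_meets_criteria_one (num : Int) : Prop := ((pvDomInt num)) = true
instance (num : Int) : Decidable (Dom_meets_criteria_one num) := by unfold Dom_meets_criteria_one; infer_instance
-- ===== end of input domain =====

-- B replaces A's single combined flag loop by two independent passes (sort-and-compare for
-- ascending, any over adjacent pairs for the double); objective: simpler.

-- ===== PORT A =====
-- literal transliteration: one loop over indices 0..len-2 maintaining (double, ascending)
def meets_criteria_one (num : Int) : Bool :=
  let string_num := PySem.Int.toChars num
  let len_num : Int := string_num.length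
  let st :=
    (PySem.List.pyRange 0 (len_num - 1) 1).foldl
      (fun (st : Bool × Bool) i =>
        let double := if PySem.List.pyGetD string_num i ' ' == PySem.List.pyGetD string_num (i + 1) ' ' then true else st.1
        let ascending := if PySem.List.pyGetD string_num i ' ' > PySem.List.pyGetD string_num (i + 1) ' ' then false else st.2
        (double, ascending))
      (false, true)
  if st.1 && st.2 then true else false

-- ===== PORT B =====
-- s[1:] on a list of characters is exactly List.drop 1 (= tail); zip stops at the shorter list, as Python's zip does
def meets_criteria_one_alt (num : Int) : Bool :=
  let s := PySem.Int.toChars num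
  let ascending := s == PySem.List.sorted s (fun c => c) false
  let double := (s.zip (s.drop 1)).any (fun p => p.1 == p.2)
  ascending && double

-- ===== PRECONDITION & SPEC =====
def Spec_meets_criteria_one (num : Int) (out : Bool) : Prop := out = meets_criteria_one_alt num
instance (num : Int) (out : Bool) : Decidable (Spec_meets_criteria_one num out) := by unfold Spec_meets_criteria_one; infer_instance

-- ===== CLAIM (what is proved, stated in full; the proofs are below) =====
def Claim_equal_meets_criteria_one : Prop := ∀ (num : Int), Dom_meets_criteria_one num → Spec_meets_criteria_one num (meets_criteria_one num)

-- ===== LEMMAS AND PROOFS =====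

-- the index loop over range(0, len-1) reading (l[i], l[i+1]) is the fold over adjacent pairs
theorem foldl_range_adj {σ : Type} (d : Char) (f : σ → Char → Char → σ) :
    ∀ (l : List Char) (init : σ),
      (List.range (l.length - 1)).foldl
        (fun st k => f st (l.getD k d) (l.getD (k + 1) d)) init
      = (l.zip (l.drop 1)).foldl (fun st p => f st p.1 p.2) init := by
  intro l
  induction l with
  | nil => intro init; simp
  | cons a t ih =>
    intro init
    cases t with
    | nil => simp
    | cons b u =>
      have h : (a :: b :: u : List Char).length - 1 = ((b :: u : List Char).length - 1) + 1 := by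
        simp
      rw [h, List.range_succ_eq_map, List.foldl_cons, List.foldl_map]
      simpa using ih (f init a b)

-- A's combined flag fold computes (any adjacent equal, all adjacent non-descending)
theorem foldl_flags (ps : List (Char × Char)) :
    ∀ (db asc : Bool),
      ps.foldl
        (fun (st : Bool × Bool) p =>
          (if p.1 == p.2 then true else st.1, if p.1 > p.2 then false else st.2))
        (db, asc)
      = (db || ps.any (fun p => p.1 == p.2), asc && ps.all (fun p => !(decide (p.1 > p.2)))) := by
  induction ps with
  | nil => intro db asc; simp
  | cons p t ih =>
    intro db asc
    simp only [List.foldl_cons, List.any_cons, List.all_cons, ih]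
    by_cases h1 : p.1 == p.2 <;> by_cases h2 : p.1 > p.2 <;>
      simp [h1, h2]

-- all adjacent pairs ≤ is exactly IsChain (· ≤ ·)
theorem all_adj_le_iff (l : List Char) :
    ((l.zip (l.drop 1)).all (fun p => p.1 ≤ p.2)) = true ↔ List.IsChain (· ≤ ·) l := by
  induction l with
  | nil => simp
  | cons a t ih =>
    cases t with
    | nil => simp
    | cons b u =>
      simp only [List.drop_one, List.tail_cons, List.zip_cons_cons, List.all_cons,
        List.isChain_cons_cons, Bool.and_eq_true, decide_eq_true_eq]
      rw [← ih]
      simp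

-- s == sorted(s) iff s is pairwise ≤
theorem eq_sorted_iff (l : List Char) :
    (l == PySem.List.sorted l (fun c => c) false) = true ↔ l.Pairwise (· ≤ ·) := by
  constructor
  · intro h
    have h' : l = PySem.List.sorted l (fun c => c) false := by simpa using h
    have := PySem.List.sorted_pairwise (xs := l) (key := fun c => c)
    rw [← h'] at this
    simpa using this
  · intro h
    have := PySem.List.sorted_eq_self_of_pairwise (xs := l) (key := fun c => c) (by simpa using h)
    simpa using this.symm

-- ===== VERDICT (by name: the statement is the Claim_ definition above) =====
theorem meets_criteria_one_spec : Claim_equal_meets_criteria_one := by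
  intro num _
  unfold Spec_meets_criteria_one meets_criteria_one meets_criteria_one_alt
  set l := PySem.Int.toChars num with hl
  simp only []
  -- rewrite the Int range fold into a Nat range fold, then into the pair fold
  have hrange :
      (PySem.List.pyRange 0 ((l.length : Int) - 1) 1).foldl
        (fun (st : Bool × Bool) i =>
          (if PySem.List.pyGetD l i ' ' == PySem.List.pyGetD l (i + 1) ' ' then true else st.1,
           if PySem.List.pyGetD l i ' ' > PySem.List.pyGetD l (i + 1) ' ' then false else st.2))
        (false, true)
      = (List.range (l.length - 1)).foldl
          (fun (st : Bool × Bool) k =>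
            (if l.getD k ' ' == l.getD (k + 1) ' ' then true else st.1,
             if l.getD k ' ' > l.getD (k + 1) ' ' then false else st.2))
          (false, true) := by
    rw [PySem.List.pyRange_one, List.foldl_map]
    have hlen : ((l.length : Int) - 1 - 0).toNat = l.length - 1 := by omega
    rw [hlen]
    apply PySem.List.foldl_congr_mem
    intro st k hk
    have h2 : (0 : Int) + (k : Int) + 1 = ((k + 1 : Nat) : Int) := by push_cast; ring
    have h1 : (0 : Int) + (k : Int) = ((k : Nat) : Int) := by ring
    rw [h2, h1, PySem.List.pyGetD_natCast, PySem.List.pyGetD_natCast]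
  rw [hrange,
    foldl_range_adj ' '
      (fun (st : Bool × Bool) a b =>
        (if a == b then true else st.1, if a > b then false else st.2)) l,
    foldl_flags]
  simp only [Bool.false_or, Bool.true_and]
  have hasc : ((l.zip (l.drop 1)).all (fun p => !(decide (p.1 > p.2))))
      = (l == PySem.List.sorted l (fun c => c) false) := by
    have e1 : ((l.zip (l.drop 1)).all (fun p => !(decide (p.1 > p.2))))
        = ((l.zip (l.drop 1)).all (fun p => p.1 ≤ p.2)) := by
      have hfun : (fun (p : Char × Char) => !(decide (p.1 > p.2)))
          = (fun (p : Char × Char) => decide (p.1 ≤ p.2)) := by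
        funext p
        rw [← decide_not]
        exact decide_eq_decide.mpr not_lt
      rw [hfun]
    rw [e1]
    by_cases h : l.Pairwise (fun a b => a ≤ b)
    · rw [(all_adj_le_iff l).2 (List.isChain_iff_pairwise.mpr h), ((eq_sorted_iff l).2 h)]
    · have c1 : ((l.zip (l.drop 1)).all (fun p => p.1 ≤ p.2)) = false := by
        cases hb : ((l.zip (l.drop 1)).all (fun p => p.1 ≤ p.2)) with
        | false => rfl
        | true => exact absurd (List.isChain_iff_pairwise.mp ((all_adj_le_iff l).1 hb)) h
      have c2 : (l == PySem.List.sorted l (fun c => c) false) = false := by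
        cases hb : (l == PySem.List.sorted l (fun c => c) false) with
        | false => rfl
        | true => exact absurd ((eq_sorted_iff l).1 hb) h
      rw [c1, c2]
  rw [hasc]
  cases hb : (l == PySem.List.sorted l (fun c => c) false) <;>
    cases hd : ((l.zip (l.drop 1)).any (fun p => p.1 == p.2)) <;> simp
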